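-- pv_equiv track=rewrite | github.com/jmsplank/hybrid-jp | scripts/deck.py | split_to_blocks
-- ===== SOURCE A (Python) =====
-- def block_to_dict(block: list[str]) -> dict[str, str]:
--     """Convert a block of text into a dictionary of key-value pairs.
--
--     The function takes a list of strings as input, where each string is formatted
--     as a key-value pair separated by either " = " or ":". The key and value are
--     stripped of leading and trailing white space, and any comments following the
--     value are removed.
--
--     Args:
--         block (list[str]): A list of strings, where each string represents a
--         key-value pair.
--
--     Returns:
--         dict[str, str]: A dictionary of key-value pairs.
--
--     Example:
--         >>> block = ["key1 = value1 # comment",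
--         ...          "key2:value2"]
--         >>> block_to_dict(block)
--         {"key1": "value1", "key2": "value2"}
--     """
--     out = {}
--     for b in block:
--         b_split = b.split(" = ")
--         if len(b_split) != 2:
--             b_split = b.split(":")
--             if len(b_split) != 2:
--                 continue
--         key, value = [i.strip() for i in b_split]
--         value = value.split("#")[0]
--         out[key] = value
--     return out
--
-- def split_to_blocks(lines_list: list[str]) -> dict[str, dict[str, str]]:
--     """Split a list of lines into blocks of text.
--
--     Each block is a dictionary of key-value pairs based on the lines between
--     "begin:<block_name>" and "end:<block_name>". The block_name is used as
--     the key in the returned dictionary.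
--
--     Args:
--         lines_list (list[str]): A list of strings, each representing a line of text.
--
--     Returns:
--         dict[str, dict[str, str]]: A dictionary of blocks, where the keys are the
--         block names and the values are dictionaries of key-value pairs based on the
--         lines in the block.
--
--     Raises:
--         Exception: If no end:<block_name> line is found for a given begin:<block_name>
--         line.
--
--     Example:
--         >>> lines_list = [
--             "begin:block1",
--             "key1:value1",
--             "key2:value2",
--             "end:block1",
--             "begin:block2",
--             "key3:value3",
--             "key4:value4",
--             "end:block2",
--         ]
--         >>> split_to_blocks(lines_list)
--         {
--             "block1": {
--                 "key1": "value1",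
--                 "key2": "value2",
--             },
--             "block2": {
--                 "key3": "value3",
--                 "key4": "value4",
--             },
--         }
--     """
--     blocks = {}
--     current_block_i = [0, 0]
--     i = 0
--     while i < len(lines_list):
--         line = lines_list[i]
--         if line.startswith("begin:"):
--             block_name = line.split(":")[1]
--             current_block_i[0] = i
--             for j in range(i, len(lines_list)):
--                 inner_line = lines_list[j]
--                 if inner_line.startswith(f"end:{block_name}"):
--                     current_block_i[1] = j
--                     break
--             if current_block_i[1] > current_block_i[0]:
--                 block_data = lines_list[current_block_i[0] + 1 : current_block_i[1]]
--                 blocks[block_name] = block_to_dict(block_data)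
--             else:
--                 raise Exception(f"No end:{block_name} found!")
--             i = current_block_i[1] + 1
--         else:
--             i += 1
--
--     return blocks
-- ===== SOURCE B (Python) =====
-- def block_to_dict(block):
--     out = {}
--     for b in block:
--         b_split = b.split(" = ")
--         if len(b_split) != 2:
--             b_split = b.split(":")
--             if len(b_split) != 2:
--                 continue
--         key, value = [i.strip() for i in b_split]
--         value = value.split("#")[0]
--         out[key] = value
--     return out
--
--
-- def split_to_blocks(lines_list):
--     """Single flat pass: state = current block name (or None) + accumulated lines."""
--     blocks = {}
--     name = None
--     acc = []
--     for line in lines_list: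
--         if name is None:
--             if line.startswith("begin:"):
--                 name = line.split(":")[1]
--                 acc = []
--         elif line.startswith(f"end:{name}"):
--             blocks[name] = block_to_dict(acc)
--             name = None
--         else:
--             acc.append(line)
--     if name is not None:
--         raise Exception(f"No end:{name} found!")
--     return blocks
-- ===== Notes on version B (the rewrite author's own statement) =====
-- stated objective: simpler
-- what changed: Replaced A's index-threaded while loop with an inner forward scan and slice per block by a single flat state-machine pass that keeps the current block name and an accumulator of its lines.
import Mathlib
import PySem

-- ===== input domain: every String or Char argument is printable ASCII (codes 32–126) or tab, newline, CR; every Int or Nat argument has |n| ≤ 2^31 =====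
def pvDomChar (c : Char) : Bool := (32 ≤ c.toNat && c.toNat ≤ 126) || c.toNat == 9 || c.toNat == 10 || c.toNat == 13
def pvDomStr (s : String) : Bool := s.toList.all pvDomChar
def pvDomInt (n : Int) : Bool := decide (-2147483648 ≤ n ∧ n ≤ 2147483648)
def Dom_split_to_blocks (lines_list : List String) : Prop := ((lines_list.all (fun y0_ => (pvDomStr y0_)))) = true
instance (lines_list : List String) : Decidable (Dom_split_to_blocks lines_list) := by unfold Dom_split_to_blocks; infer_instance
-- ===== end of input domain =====

-- B replaces A's index-threaded while loop with inner forward scans and slicing by a single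
-- flat state-machine pass (current block name + accumulator); objective: simpler.

-- ===== PORT A =====

-- s.split(sep) for nonempty sep (split? is always `some` then)
def pysplit (s sep : String) : List String := (PySem.Str.split? s sep).getD []

-- helper shared by both ports: block_to_dict is textually identical in Source A and Source B
def block_to_dict (block : List String) : List (String × String) :=
  (block.foldl (fun out b =>
    let s1 := pysplit b " = "
    let bs := if s1.length ≠ 2 then pysplit b ":" else s1
    match bs with
    | [k0, v0] =>
        out.insert (PySem.Str.strip k0)
          (((pysplit (PySem.Str.strip v0) "#").headD ""))
    | _ => out) (PySem.Dict.empty)).items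

-- line.split(":")[1]; the index is only read on lines starting with "begin:", where it exists
def begName (line : String) : String := (pysplit line ":").getD 1 ""

-- inner `for j in range(i, len(lines))` scan with break
def findEndA (lines : List String) (name : String) (j : Nat) : Option Nat :=
  if h : j < lines.length then
    if PySem.Str.startswith lines[j] ("end:" ++ name) then some j
    else findEndA lines name (j + 1)
  else none
termination_by lines.length - j

-- the while loop; cb0/cb1 = current_block_i (cb1 persists across iterations, as in A)
def splitLoopA (lines : List String) (i cb0 cb1 : Nat)
    (blocks : PySem.Dict String (List (String × String))) :
    PySem.Dict String (List (String × String)) :=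
  if h : i < lines.length then
    if PySem.Str.startswith lines[i] "begin:" then
      let cb1' := (findEndA lines (begName lines[i]) i).getD cb1
      if _hlt : i < cb1' then
        splitLoopA lines (cb1' + 1) i cb1'
          (blocks.insert (begName lines[i])
            (block_to_dict ((lines.drop (i + 1)).take (cb1' - (i + 1)))))
      else blocks  -- Python raises Exception(f"No end:{name} found!") here; excluded by Pre_
    else splitLoopA lines (i + 1) cb0 cb1 blocks
  else blocks
termination_by lines.length - i
decreasing_by all_goals omega

def split_to_blocks (lines_list : List String) : List (String × List (String × String)) :=
  (splitLoopA lines_list 0 0 0 PySem.Dict.empty).items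

-- ===== PORT B =====

-- one flat pass; state = none (outside a block) or some (name, accumulated lines)
def splitLoopB (blocks : PySem.Dict String (List (String × String)))
    (st : Option (String × List String)) :
    List String → PySem.Dict String (List (String × String))
  | [] => blocks  -- Python raises Exception(f"No end:{name} found!") if st ≠ none; excluded by Pre_
  | line :: rest =>
    match st with
    | none =>
        if PySem.Str.startswith line "begin:" then
          splitLoopB blocks (some (begName line, [])) rest
        else splitLoopB blocks none rest
    | some (name, acc) =>
        if PySem.Str.startswith line ("end:" ++ name) then
          splitLoopB (blocks.insert name (block_to_dict acc)) none rest
        else splitLoopB blocks (some (name, acc ++ [line])) rest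

def split_to_blocks_alt (lines_list : List String) : List (String × List (String × String)) :=
  (splitLoopB PySem.Dict.empty none lines_list).items

-- ===== PRECONDITION & SPEC =====

-- every opened block is closed: tracking the open block name, the list ends outside a block
def wfBlocks : Option String → List String → Bool
  | none, [] => true
  | some _, [] => false
  | none, line :: rest =>
      wfBlocks (if PySem.Str.startswith line "begin:" then some (begName line) else none) rest
  | some name, line :: rest =>
      wfBlocks (if PySem.Str.startswith line ("end:" ++ name) then none else some name) rest

-- Pre_ excludes exactly the inputs on which A raises Exception (an unclosed begin:<name> block)
def Pre_split_to_blocks (lines_list : List String) : Prop := wfBlocks none lines_list = true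
instance (lines_list : List String) : Decidable (Pre_split_to_blocks lines_list) := by
  unfold Pre_split_to_blocks; infer_instance

def pvWitness_split_to_blocks : List String :=
  ["begin:b1", "k1:v1", "k2 = v2 # c", "end:b1", "x", "begin:b2", "end:b2"]

def Spec_split_to_blocks (lines_list : List String) (out : List (String × List (String × String))) : Prop := out = split_to_blocks_alt lines_list
instance (lines_list : List String) (out : List (String × List (String × String))) : Decidable (Spec_split_to_blocks lines_list out) := by unfold Spec_split_to_blocks; infer_instance

-- ===== CLAIM (what is proved, stated in full; the proofs are below) =====
def Claim_equal_split_to_blocks : Prop := ∀ (lines_list : List String), Dom_split_to_blocks lines_list → Pre_split_to_blocks lines_list → Spec_split_to_blocks lines_list (split_to_blocks lines_list)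

-- ===== LEMMAS AND PROOFS =====

lemma findEndA_of_wf (lines : List String) (name : String) (j : Nat)
    (hwf : wfBlocks (some name) (lines.drop j) = true) :
    ∃ k, findEndA lines name j = some k ∧ j ≤ k ∧ wfBlocks none (lines.drop (k + 1)) = true := by
  revert hwf
  fun_induction findEndA lines name j with
  | case1 j hj hm =>
      intro hwf
      rw [List.drop_eq_getElem_cons hj] at hwf
      refine ⟨j, rfl, le_refl _, ?_⟩
      simp only [wfBlocks] at hwf
      rwa [if_pos hm] at hwf
  | case2 j hj hm ih =>
      intro hwf
      rw [List.drop_eq_getElem_cons hj] at hwf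
      simp only [Bool.not_eq_true] at hm
      obtain ⟨k, hfe, hk, hwf'⟩ := ih (by simpa only [wfBlocks, hm, if_true, if_false, Bool.false_eq_true] using hwf)
      exact ⟨k, hfe, by omega, hwf'⟩
  | case3 j hj =>
      intro hwf
      rw [List.drop_eq_nil_of_le (by omega)] at hwf
      simp [wfBlocks] at hwf

lemma findEndA_ge (lines : List String) (name : String) (j k : Nat)
    (h : findEndA lines name j = some k) : j ≤ k := by
  revert h
  fun_induction findEndA lines name j with
  | case1 => intro h; simp_all
  | case2 j hj hm ih => intro h; exact le_trans (by omega) (ih h)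
  | case3 => intro h; simp_all

lemma splitLoopB_in_block (lines : List String) (name : String) (j k : Nat)
    (hfe : findEndA lines name j = some k)
    (blocks : PySem.Dict String (List (String × String))) (acc : List String) :
    splitLoopB blocks (some (name, acc)) (lines.drop j) =
      splitLoopB (blocks.insert name (block_to_dict (acc ++ (lines.drop j).take (k - j))))
        none (lines.drop (k + 1)) := by
  revert hfe blocks acc
  fun_induction findEndA lines name j with
  | case1 j hj hm =>
      intro hfe blocks acc
      obtain rfl : j = k := by simpa using hfe
      rw [List.drop_eq_getElem_cons hj]
      simp at hm
      simp [splitLoopB, hm]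
  | case2 j hj hm ih =>
      intro hfe blocks acc
      have hk : j + 1 ≤ k := findEndA_ge lines name (j + 1) k hfe
      rw [List.drop_eq_getElem_cons hj]
      simp only [Bool.not_eq_true] at hm
      simp at hm
      simp only [splitLoopB]
      rw [if_neg (by simp [hm])]
      rw [ih hfe blocks (acc ++ [lines[j]])]
      have htake : lines[j] :: (List.drop (j + 1) lines).take (k - (j + 1)) =
          (lines[j] :: List.drop (j + 1) lines).take (k - j) := by
        have : k - j = (k - (j + 1)) + 1 := by omega
        rw [this, List.take_succ_cons]
      rw [← htake]
      simp
  | case3 j hj =>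
      intro hfe
      simp at hfe

lemma not_end_of_begin (line name : String)
    (hb : PySem.Str.startswith line "begin:" = true) :
    PySem.Str.startswith line ("end:" ++ name) = false := by
  simp only [PySem.Str.startswith_eq, String.toList_append] at *
  rw [Bool.eq_false_iff]
  intro hcontra
  rw [PySem.Chars.startswith_iff] at hb hcontra
  obtain ⟨t1, h1⟩ := hb
  obtain ⟨t2, h2⟩ := hcontra
  rw [← h2] at h1
  simp at h1

lemma loop_eq_aux (lines : List String) :
    ∀ (n i cb0 cb1 : Nat) (blocks : PySem.Dict String (List (String × String))),
      lines.length - i ≤ n →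
      wfBlocks none (lines.drop i) = true →
      splitLoopA lines i cb0 cb1 blocks = splitLoopB blocks none (lines.drop i) := by
  intro n
  induction n with
  | zero =>
      intro i cb0 cb1 blocks hn hwf
      have hge : lines.length ≤ i := by omega
      rw [splitLoopA.eq_def, dif_neg (by omega), List.drop_eq_nil_of_le hge]
      rfl
  | succ n ih =>
      intro i cb0 cb1 blocks hn hwf
      by_cases h : i < lines.length
      · rw [List.drop_eq_getElem_cons h] at hwf ⊢
        rw [splitLoopA.eq_def, dif_pos h]
        by_cases hb : PySem.Str.startswith lines[i] "begin:" = true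
        · simp only [wfBlocks] at hwf
          rw [if_pos hb] at hwf
          obtain ⟨k, hfe, hk, hwf'⟩ := findEndA_of_wf lines (begName lines[i]) (i + 1) hwf
          have hfe0 : findEndA lines (begName lines[i]) i = some k := by
            rw [findEndA.eq_def, dif_pos h,
              if_neg (by have := not_end_of_begin lines[i] (begName lines[i]) hb; simp at this; simp [this])]
            exact hfe
          rw [if_pos hb]
          simp only [hfe0, Option.getD_some]
          rw [dif_pos (by omega : i < k)]
          rw [ih (k + 1) i k _ (by omega) hwf']
          simp only [splitLoopB]
          rw [if_pos hb]
          rw [splitLoopB_in_block lines (begName lines[i]) (i + 1) k hfe blocks []]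
          simp
        · rw [if_neg hb]
          simp only [wfBlocks] at hwf
          rw [if_neg hb] at hwf
          rw [ih (i + 1) cb0 cb1 blocks (by omega) hwf]
          simp only [splitLoopB]
          rw [if_neg hb]
      · rw [splitLoopA.eq_def, dif_neg h, List.drop_eq_nil_of_le (by omega)]
        rfl

lemma loop_eq (lines : List String) :
    ∀ (i cb0 cb1 : Nat) (blocks : PySem.Dict String (List (String × String))),
      wfBlocks none (lines.drop i) = true →
      splitLoopA lines i cb0 cb1 blocks = splitLoopB blocks none (lines.drop i) := by
  intro i cb0 cb1 blocks hwf
  exact loop_eq_aux lines lines.length i cb0 cb1 blocks (by omega) hwf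

-- ===== VERDICT (by name: the statement is the Claim_ definition above) =====
theorem split_to_blocks_spec : Claim_equal_split_to_blocks := by
  intro lines _dom hpre
  unfold Spec_split_to_blocks split_to_blocks split_to_blocks_alt
  rw [loop_eq lines 0 0 0 PySem.Dict.empty (by simpa using hpre)]
  simp
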